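-- pv_equiv track=rewrite | github.com/Vladimir-Voronin/pyhts | pyhts/hts_words_priority/priority_calculations.py | get_words_classic
-- ===== SOURCE A (Python) =====
-- def get_words_classic(method_freq_dict, user_freq_dict, number_of_words, coef_cancel=1) -> list:
--     result = []
--
--     # sort dictinary by rating
--     method_freq_dict = {k: v for k, v in sorted(method_freq_dict.items(), key=lambda item: item[1], reverse=True)}
--
--     method_freq_dict = {k: method_freq_dict[k] for k in
--                         list(method_freq_dict)[:len(user_freq_dict) + number_of_words]}
--
--     for key, value in user_freq_dict.items():
--         if value >= coef_cancel:
--             if key in method_freq_dict: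
--                 del method_freq_dict[key]
--
--     return list(method_freq_dict.keys())[:number_of_words]
-- ===== SOURCE B (Python) =====
-- def get_words_classic(method_freq_dict, user_freq_dict, number_of_words, coef_cancel=1) -> list:
--     cancelled = {k for k, v in user_freq_dict.items() if v >= coef_cancel}
--     result = []
--     for key, _ in sorted(method_freq_dict.items(), key=lambda item: item[1], reverse=True):
--         if len(result) == number_of_words:
--             break
--         if key not in cancelled:
--             result.append(key)
--     return result
-- ===== Notes on version B (the rewrite author's own statement) =====
-- stated objective: simpler
-- what changed: Replaces A's two dict rebuilds, truncation slice, deletion loop and final slice by one cancelled-set plus a single early-stopping pass over the sorted items; correct because the first number_of_words survivors always lie within A's len(user)+number_of_words truncation window.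
-- outside the precondition, e.g. on get_words_classic({'a': 2, 'b': 1}, {}, -1, 1): A returns [], B returns ['a', 'b']
import Mathlib
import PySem

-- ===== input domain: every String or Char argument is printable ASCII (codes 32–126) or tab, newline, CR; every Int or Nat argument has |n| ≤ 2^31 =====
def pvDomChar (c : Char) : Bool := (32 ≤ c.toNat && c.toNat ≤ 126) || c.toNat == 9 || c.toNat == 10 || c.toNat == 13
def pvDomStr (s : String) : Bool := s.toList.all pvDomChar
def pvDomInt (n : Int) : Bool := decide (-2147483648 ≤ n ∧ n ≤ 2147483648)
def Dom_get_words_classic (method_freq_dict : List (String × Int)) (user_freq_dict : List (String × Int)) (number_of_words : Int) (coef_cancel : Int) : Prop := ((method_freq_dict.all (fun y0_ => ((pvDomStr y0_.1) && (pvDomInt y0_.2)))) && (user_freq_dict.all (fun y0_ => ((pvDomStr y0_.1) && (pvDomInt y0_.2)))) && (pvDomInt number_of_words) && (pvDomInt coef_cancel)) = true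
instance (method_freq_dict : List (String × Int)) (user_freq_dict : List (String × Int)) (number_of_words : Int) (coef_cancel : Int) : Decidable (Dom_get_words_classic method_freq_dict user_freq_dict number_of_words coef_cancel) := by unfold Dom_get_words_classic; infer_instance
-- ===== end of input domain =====

-- ===== PORT A =====
-- B replaces A's dict rebuilds/truncation/deletion loop by a cancelled-set and one early-stopping
-- pass over the sorted items (objective: simpler); equivalence proved for number_of_words >= 0.
def get_words_classic (method_freq_dict : List (String × Int)) (user_freq_dict : List (String × Int)) (number_of_words : Int) (coef_cancel : Int) : List String :=
  -- method_freq_dict = {k: v for k, v in sorted(method_freq_dict.items(), key=lambda item: item[1], reverse=True)}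
  let sortedItems := PySem.List.sorted method_freq_dict (fun item => item.2) true
  let d1 : PySem.Dict String Int := sortedItems.foldl (fun d kv => d.insert kv.1 kv.2) PySem.Dict.empty
  -- list(method_freq_dict)[:len(user_freq_dict) + number_of_words]
  let keys2 := PySem.List.slice d1.keys none (some ((user_freq_dict.length : Int) + number_of_words))
  -- {k: method_freq_dict[k] for k in ...}; k is drawn from d1's own keys, so the lookup
  -- d1[k] always succeeds and (d1.get? k).getD 0 is exact (the default 0 is never used)
  let d2 : PySem.Dict String Int := keys2.foldl (fun d k => d.insert k ((d1.get? k).getD 0)) PySem.Dict.empty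
  -- for key, value in user_freq_dict.items(): if value >= coef_cancel: if key in d2: del d2[key]
  let d3 := user_freq_dict.foldl (fun d kv => if kv.2 ≥ coef_cancel then (if d.contains kv.1 then d.erase kv.1 else d) else d) d2
  -- return list(d3.keys())[:number_of_words]
  PySem.List.slice d3.keys none (some number_of_words)

-- ===== PORT B =====
-- the for-loop of Source B with its break: stop as soon as result has number_of_words entries
def gwcGo (cancelled : PySem.Set String) (number_of_words : Int) : List (String × Int) → List String → List String
  | [], result => result
  | (key, _) :: rest, result =>
    if (result.length : Int) = number_of_words then result
    else if PySem.Set.contains cancelled key then gwcGo cancelled number_of_words rest result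
    else gwcGo cancelled number_of_words rest (result ++ [key])

def get_words_classic_alt (method_freq_dict : List (String × Int)) (user_freq_dict : List (String × Int)) (number_of_words : Int) (coef_cancel : Int) : List String :=
  -- cancelled = {k for k, v in user_freq_dict.items() if v >= coef_cancel}
  let cancelled : PySem.Set String := PySem.Set.ofList ((user_freq_dict.filter (fun kv => kv.2 ≥ coef_cancel)).map Prod.fst)
  gwcGo cancelled number_of_words (PySem.List.sorted method_freq_dict (fun item => item.2) true) []

-- ===== PRECONDITION & SPEC =====
-- Pre_ restricts to the natural domain: number_of_words ≥ 0 (a negative count is outside the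
-- task's natural domain; A's value there is an accident of its two negative slices), and the two
-- association lists have distinct keys (vacuous for real inputs: Python dict keys are distinct).
def Pre_get_words_classic (method_freq_dict : List (String × Int)) (user_freq_dict : List (String × Int)) (number_of_words : Int) (coef_cancel : Int) : Prop :=
  0 ≤ number_of_words ∧ (method_freq_dict.map Prod.fst).Nodup ∧ (user_freq_dict.map Prod.fst).Nodup
instance (method_freq_dict : List (String × Int)) (user_freq_dict : List (String × Int)) (number_of_words : Int) (coef_cancel : Int) : Decidable (Pre_get_words_classic method_freq_dict user_freq_dict number_of_words coef_cancel) := by unfold Pre_get_words_classic; infer_instance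
def pvWitness_get_words_classic : (List (String × Int)) × (List (String × Int)) × Int × Int := ([("a", 2), ("b", 1)], [("b", 1)], 1, 1)
def Spec_get_words_classic (method_freq_dict : List (String × Int)) (user_freq_dict : List (String × Int)) (number_of_words : Int) (coef_cancel : Int) (out : List String) : Prop := out = get_words_classic_alt method_freq_dict user_freq_dict number_of_words coef_cancel
instance (method_freq_dict : List (String × Int)) (user_freq_dict : List (String × Int)) (number_of_words : Int) (coef_cancel : Int) (out : List String) : Decidable (Spec_get_words_classic method_freq_dict user_freq_dict number_of_words coef_cancel out) := by unfold Spec_get_words_classic; infer_instance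

-- ===== CLAIM (what is proved, stated in full; the proofs are below) =====
def Claim_equal_get_words_classic : Prop := ∀ (method_freq_dict : List (String × Int)) (user_freq_dict : List (String × Int)) (number_of_words : Int) (coef_cancel : Int), Dom_get_words_classic method_freq_dict user_freq_dict number_of_words coef_cancel → Pre_get_words_classic method_freq_dict user_freq_dict number_of_words coef_cancel → Spec_get_words_classic method_freq_dict user_freq_dict number_of_words coef_cancel (get_words_classic method_freq_dict user_freq_dict number_of_words coef_cancel)

-- ===== LEMMAS AND PROOFS =====

lemma gwc_erase_keys {d : PySem.Dict String Int} {k : String} : (d.erase k).keys = d.keys.filter (fun x => !(x == k)) := by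
  simp only [PySem.Dict.erase, PySem.Dict.keys, List.filter_map]
  rfl

lemma gwc_erase_of_not_contains {d : PySem.Dict String Int} {k : String} (h : d.contains k = false) : d.erase k = d := by
  apply PySem.Dict.ext
  simp only [PySem.Dict.erase]
  apply List.filter_eq_self.mpr
  intro a ha
  simp only [PySem.Dict.contains, List.any_eq_false] at h
  simpa using h a ha

-- a fold of fresh inserts over a nodup key list: the keys are that list
lemma gwc_keys_fold_fresh {α : Type} (f : α → String) (v : α → Int) (l : List α) (h : (l.map f).Nodup) :
    ((l.foldl (fun d a => d.insert (f a) (v a)) PySem.Dict.empty).keys) = l.map f := by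
  have h2 := PySem.Dict.items_foldl_insert_fresh l f v PySem.Dict.empty (fun a _ => PySem.Dict.contains_empty (f a)) h
  simp only [PySem.Dict.keys, h2]
  simp [PySem.Dict.empty, List.map_map, Function.comp]

-- the user-dict deletion loop filters the cancelled keys out of the dict's key list
lemma gwc_keys_cancel_fold (c : Int) : ∀ (u : List (String × Int)) (d : PySem.Dict String Int),
    (u.foldl (fun d kv => if kv.2 ≥ c then (if d.contains kv.1 then d.erase kv.1 else d) else d) d).keys
      = d.keys.filter (fun k => !(((u.filter (fun kv => kv.2 ≥ c)).map Prod.fst).contains k)) := by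
  intro u
  induction u with
  | nil => intro d; simp
  | cons kv t ih =>
    intro d
    simp only [List.foldl_cons, List.filter_cons]
    by_cases hc : kv.2 ≥ c
    · have hstep : (if kv.2 ≥ c then (if d.contains kv.1 then d.erase kv.1 else d) else d) = d.erase kv.1 := by
        by_cases h1 : d.contains kv.1
        · simp [hc, h1]
        · simp only [eq_false_of_ne_true h1]
          simp [hc, gwc_erase_of_not_contains (eq_false_of_ne_true h1)]
      rw [hstep, ih, gwc_erase_keys, List.filter_filter]
      apply List.filter_congr
      intro x _
      simp [hc, Bool.and_comm]
    · simp only [decide_eq_true_eq, hc, if_false]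
      rw [ih]

-- truncation before filtering is inert: the first N survivors lie within the first K+N positions
lemma gwc_take_filter_take (p : String → Bool) : ∀ (xs : List String) (K N : ℕ),
    (xs.filter (fun x => !(p x))).length ≤ K →
    ((xs.take (K + N)).filter p).take N = (xs.filter p).take N := by
  intro xs
  induction xs with
  | nil => intro K N _; simp
  | cons x t ih =>
    intro K N hK
    by_cases hp : p x = true
    · cases N with
      | zero => simp
      | succ N' =>
        have hkn : K + (N' + 1) = (K + N') + 1 := by omega
        rw [hkn]
        simp only [List.take_succ_cons, List.filter_cons, hp, if_pos, List.take_succ_cons]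
        rw [ih K N' (by simpa [List.filter_cons, hp] using hK)]
    · have hp' : p x = false := eq_false_of_ne_true hp
      have hK' : (t.filter (fun y => !(p y))).length + 1 ≤ K := by
        simpa [List.filter_cons, hp'] using hK
      cases K with
      | zero => omega
      | succ K' =>
        have hkn : K' + 1 + N = (K' + N) + 1 := by omega
        rw [hkn]
        simp only [List.take_succ_cons, List.filter_cons, hp', Bool.false_eq_true, if_false]
        exact ih K' N (by omega)

lemma gwc_go_spec (C : PySem.Set String) (n : Int) (hn : 0 ≤ n) : ∀ (l : List (String × Int)) (res : List String),
    res.length ≤ n.toNat →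
    gwcGo C n l res = res ++ ((l.map Prod.fst).filter (fun k => !(PySem.Set.contains C k))).take (n.toNat - res.length) := by
  intro l
  induction l with
  | nil => intro res _; simp [gwcGo]
  | cons kv t ih =>
    intro res hres
    obtain ⟨key, val⟩ := kv
    by_cases hfull : (res.length : Int) = n
    · have h0 : n.toNat - res.length = 0 := by omega
      simp [gwcGo, hfull, h0]
    · have hlt : res.length < n.toNat := by
        rcases lt_or_eq_of_le hres with h | h
        · exact h
        · exfalso; apply hfull; omega
      simp only [gwcGo, hfull, if_false, List.map_cons, List.filter_cons]
      by_cases hC : PySem.Set.contains C key = true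
      · simp only [hC, if_true, Bool.not_true, Bool.false_eq_true, if_false]
        exact ih res hres
      · have hC' : PySem.Set.contains C key = false := eq_false_of_ne_true hC
        simp only [hC', Bool.false_eq_true, if_false, Bool.not_false, if_true]
        rw [ih (res ++ [key]) (by simp; omega)]
        have harith : n.toNat - res.length = (n.toNat - (res ++ [key]).length) + 1 := by simp; omega
        rw [harith]
        simp [List.take_succ_cons]

lemma gwc_contains_ofList (l : List String) (x : String) : PySem.Set.contains (PySem.Set.ofList l) x = l.contains x := by
  simp only [PySem.Set.contains]
  by_cases h : x ∈ l
  · have h2 : x ∈ PySem.Set.ofList l := (PySem.Set.mem_ofList l x).mpr h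
    simp [h, h2]
  · have h2 : x ∉ PySem.Set.ofList l := fun hx => h ((PySem.Set.mem_ofList l x).mp hx)
    simp [h, h2]

-- specialization of the fresh-fold lemma to an identity key (the second dict comprehension)
lemma gwc_keys_fold_fresh_id (v : String → Int) (l : List String) (h : l.Nodup) :
    ((l.foldl (fun d k => d.insert k (v k)) PySem.Dict.empty).keys) = l := by
  have h2 := gwc_keys_fold_fresh (fun k => k) v l (by simpa using h)
  simpa using h2

-- ===== VERDICT (by name: the statement is the Claim_ definition above) =====
theorem get_words_classic_spec : Claim_equal_get_words_classic := by
  intro m u n c _hdom ⟨hn, hmnd, hund⟩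
  unfold Spec_get_words_classic get_words_classic get_words_classic_alt
  dsimp only
  set s := PySem.List.sorted m (fun item => item.2) true with hs
  have hks : (s.map Prod.fst).Nodup := (((PySem.List.sorted_perm m (fun item => item.2) true).map Prod.fst).nodup_iff).mpr hmnd
  set Cl := (u.filter (fun kv => kv.2 ≥ c)).map Prod.fst with hCl
  -- A side
  rw [gwc_keys_fold_fresh Prod.fst Prod.snd s hks]
  have hL : (0:Int) ≤ (u.length : Int) + n := by omega
  rw [PySem.List.slice_to _ hL]
  have hLnat : ((u.length : Int) + n).toNat = u.length + n.toNat := by omega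
  rw [hLnat]
  have hnd2 : ((s.map Prod.fst).take (u.length + n.toNat)).Nodup :=
    (List.take_sublist _ _).nodup hks
  rw [gwc_keys_cancel_fold c u]
  rw [gwc_keys_fold_fresh_id (fun k => (((List.foldl (fun d kv => d.insert kv.1 kv.2) PySem.Dict.empty s).get? k).getD 0)) _ hnd2]
  rw [PySem.List.slice_to _ hn]
  -- B side
  rw [gwc_go_spec _ n hn s [] (by simp)]
  simp only [List.nil_append, List.length_nil, Nat.sub_zero]
  have hfc : ((s.map Prod.fst).filter (fun k => !(PySem.Set.contains (PySem.Set.ofList Cl) k)))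
      = ((s.map Prod.fst).filter (fun k => !(Cl.contains k))) := by
    apply List.filter_congr
    intro x _
    rw [gwc_contains_ofList]
  rw [hfc]
  -- truncation is inert
  have hbound : ((s.map Prod.fst).filter (fun x => !(!(Cl.contains x)))).length ≤ u.length := by
    have he : ((s.map Prod.fst).filter (fun x => !(!(Cl.contains x))))
        = ((s.map Prod.fst).filter (fun x => Cl.contains x)) := by
      apply List.filter_congr; intro x _; simp
    rw [he]
    have hndf : ((s.map Prod.fst).filter (fun x => Cl.contains x)).Nodup := hks.filter _
    have hsub : ((s.map Prod.fst).filter (fun x => Cl.contains x)) ⊆ Cl := by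
      intro x hx
      have := List.of_mem_filter hx
      simpa using this
    calc ((s.map Prod.fst).filter (fun x => Cl.contains x)).length
        ≤ Cl.length := (List.subperm_of_subset hndf hsub).length_le
      _ ≤ u.length := by
          rw [hCl, List.length_map]
          exact List.length_filter_le _ u
  exact gwc_take_filter_take (fun k => !(Cl.contains k)) (s.map Prod.fst) u.length n.toNat hbound
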